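-- pv_equiv track=rewrite | github.com/VasanthManiVasi/Advent-Of-Code-2019 | day4.py | double
-- ===== SOURCE A (Python) =====
-- def double(arr):
--     a1, a2 = [], []
--     for i in arr:
--         n = str(i)
--         doubles = False
--         d = {}
--         for j in range(len(n)-1):
--             if n[j] == n[j+1]:
--                 doubles = True
--                 d[n[j]] = 1 if n[j] not in d else d[n[j]] + 1
--         if doubles:
--             a1 += [i]
--         if 1 in d.values():
--             a2 += [i]
--     return a1, a2
-- ===== SOURCE B (Python) =====
-- def double(arr):
--     # One pass per number over its digit-run decomposition instead of A's
--     # index-pair scan: split str(i) into maximal runs, accumulate per-digit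
--     # pair counts run by run.
--     a1, a2 = [], []
--     for i in arr:
--         s = str(i)
--         counts = {}
--         pos = 0
--         while pos < len(s):
--             ch = s[pos]
--             end = pos + 1
--             while end < len(s) and s[end] == ch:
--                 end += 1
--             length = end - pos
--             if length >= 2:
--                 counts[ch] = counts.get(ch, 0) + (length - 1)
--             pos = end
--         if counts:
--             a1.append(i)
--         if 1 in counts.values():
--             a2.append(i)
--     return a1, a2
-- ===== Notes on version B (the rewrite author's own statement) =====
-- stated objective: alternative
-- what changed: Replaces A's index-pair scan (range(len(n)-1) with n[j]==n[j+1] tests and a per-pair dict increment) by a single pass over the maximal digit runs of str(i), adding run_length-1 to the digit's count once per run; 'has adjacent double' becomes 'the counts dict is non-empty'.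
import Mathlib
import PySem

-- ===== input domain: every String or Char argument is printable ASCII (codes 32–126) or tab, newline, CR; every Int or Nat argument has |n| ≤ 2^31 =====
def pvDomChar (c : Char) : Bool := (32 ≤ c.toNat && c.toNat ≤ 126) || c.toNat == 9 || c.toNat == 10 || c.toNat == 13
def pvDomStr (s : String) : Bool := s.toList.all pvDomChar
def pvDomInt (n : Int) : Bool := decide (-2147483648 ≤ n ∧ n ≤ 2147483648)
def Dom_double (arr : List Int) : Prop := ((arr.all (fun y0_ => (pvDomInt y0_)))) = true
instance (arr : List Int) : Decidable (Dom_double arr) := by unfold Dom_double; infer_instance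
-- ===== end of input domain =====

-- B replaces A's adjacent-index pair scan by a single pass over the maximal digit runs
-- of str(i), adding (run length - 1) per qualifying run; objective: alternative decomposition.

-- ===== PORT A =====
def double (arr : List Int) : List Int × List Int :=
  arr.foldl (fun acc i =>
    let n : List Char := PySem.Int.toChars i
    let st :=
      (PySem.List.pyRange 0 ((n.length : Int) - 1) 1).foldl
        (fun (st : Bool × PySem.Dict Char Int) j =>
          if PySem.List.pyGetD n j ' ' = PySem.List.pyGetD n (j + 1) ' ' then
            (true, st.2.insert (PySem.List.pyGetD n j ' ')
              (if st.2.contains (PySem.List.pyGetD n j ' ') = false then 1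
               else st.2.getD (PySem.List.pyGetD n j ' ') 0 + 1))
          else st)
        (false, PySem.Dict.empty)
    ((if st.1 then acc.1 ++ [i] else acc.1),
     (if (1 : Int) ∈ st.2.values then acc.2 ++ [i] else acc.2)))
  ([], [])

-- ===== PORT B =====
-- the inner while loop of Source B: consume one maximal run per step
def altRunCounts : List Char → PySem.Dict Char Int → PySem.Dict Char Int
  | [], counts => counts
  | c :: rest, counts =>
      let run := rest.takeWhile (fun x => x == c)
      let length := run.length + 1
      let counts' := if 2 ≤ length then counts.insert c (counts.getD c 0 + ((length : Int) - 1)) else counts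
      altRunCounts (rest.dropWhile (fun x => x == c)) counts'
  termination_by cs _ => cs.length
  decreasing_by exact Nat.lt_succ_of_le (List.length_dropWhile_le _ rest)

def double_alt (arr : List Int) : List Int × List Int :=
  arr.foldl (fun acc i =>
    let counts := altRunCounts (PySem.Int.toChars i) PySem.Dict.empty
    ((if counts.items ≠ [] then acc.1 ++ [i] else acc.1),
     (if (1 : Int) ∈ counts.values then acc.2 ++ [i] else acc.2)))
  ([], [])

-- ===== PRECONDITION & SPEC =====
def Spec_double (arr : List Int) (out : List Int × List Int) : Prop := out = double_alt arr
instance (arr : List Int) (out : List Int × List Int) : Decidable (Spec_double arr out) := by unfold Spec_double; infer_instance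

-- ===== CLAIM (what is proved, stated in full; the proofs are below) =====
def Claim_equal_double : Prop := ∀ (arr : List Int), Dom_double arr → Spec_double arr (double arr)

-- ===== LEMMAS AND PROOFS =====

-- the chars c such that c occurs at position j with the same char at j+1, in scan order
def pvPairs : List Char → List Char
  | a :: b :: rest => (if a = b then [a] else []) ++ pvPairs (b :: rest)
  | _ => []

-- the counting fold both sides reduce to
def pvF (d : PySem.Dict Char Int) (xs : List Char) : PySem.Dict Char Int :=
  xs.foldl (fun d x => d.insert x (d.getD x 0 + 1)) d

theorem pvPairs_short (cs : List Char) (h : cs.length ≤ 1) : pvPairs cs = [] := by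
  match cs with
  | [] => rfl
  | [_] => rfl
  | _ :: _ :: _ => simp at h

theorem pvF_append (d : PySem.Dict Char Int) (xs ys : List Char) :
    pvF d (xs ++ ys) = pvF (pvF d xs) ys := by
  simp [pvF, List.foldl_append]

theorem insert_cond (d : PySem.Dict Char Int) (c : Char) :
    d.insert c (if d.contains c = false then 1 else d.getD c 0 + 1)
      = d.insert c (d.getD c 0 + 1) := by
  cases h : d.contains c
  · simp [PySem.Dict.getD_of_not_contains d 0 h]
  · simp

theorem pvF_replicate (c : Char) (m : Nat) : ∀ d : PySem.Dict Char Int,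
    pvF d (List.replicate (m + 1) c) = d.insert c (d.getD c 0 + ((m : Int) + 1)) := by
  induction m with
  | zero => intro d; simp [pvF]
  | succ m ih =>
      intro d
      rw [List.replicate_succ]
      have : pvF d (c :: List.replicate (m + 1) c)
          = pvF (d.insert c (d.getD c 0 + 1)) (List.replicate (m + 1) c) := rfl
      rw [this, ih, PySem.Dict.getD_insert_self, PySem.Dict.insert_insert_self]
      push_cast; ring_nf

theorem pvPairs_replicate_append (c : Char) (r : List Char)
    (h : ∀ x, r.head? = some x → x ≠ c) : ∀ m,
    pvPairs (List.replicate (m + 1) c ++ r) = List.replicate m c ++ pvPairs r := by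
  intro m
  induction m with
  | zero =>
      cases r with
      | nil => rfl
      | cons y r' =>
          have hy : y ≠ c := h y rfl
          simp [pvPairs, (Ne.symm hy)]
  | succ m ih =>
      have h1 : List.replicate (m + 2) c ++ r = c :: (List.replicate (m + 1) c ++ r) := by
        rw [List.replicate_succ]; rfl
      have h2 : List.replicate (m + 1) c ++ r = c :: (List.replicate m c ++ r) := by
        rw [List.replicate_succ]; rfl
      rw [h1]
      conv_lhs => rw [h2]
      show (if c = c then [c] else []) ++ pvPairs (List.replicate (m + 1) c ++ r)
          = List.replicate (m + 1) c ++ pvPairs r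
      rw [ih, List.replicate_succ]
      simp

theorem altRunCounts_eq : ∀ (k : Nat) (cs : List Char), cs.length ≤ k →
    ∀ d, altRunCounts cs d = pvF d (pvPairs cs) := by
  intro k
  induction k with
  | zero =>
      intro cs h d
      have : cs = [] := List.eq_nil_of_length_eq_zero (Nat.le_zero.mp h)
      subst this; rw [altRunCounts]; rfl
  | succ k ih =>
      intro cs h d
      cases cs with
      | nil => rw [altRunCounts]; rfl
      | cons c rest =>
          have hrun : rest.takeWhile (fun x => x == c)
              = List.replicate (rest.takeWhile (fun x => x == c)).length c := by
            rw [List.eq_replicate_iff]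
            refine ⟨rfl, fun b hb => ?_⟩
            have := List.mem_takeWhile_imp hb
            simpa using this
          have hsplit : rest.takeWhile (fun x => x == c) ++ rest.dropWhile (fun x => x == c)
              = rest := List.takeWhile_append_dropWhile
          have hhead : ∀ x, (rest.dropWhile (fun x => x == c)).head? = some x → x ≠ c := by
            intro x hx
            have := List.head?_dropWhile_not (fun x => x == c) rest
            rw [hx] at this
            simpa using this
          have hlen : (rest.dropWhile (fun x => x == c)).length ≤ k := by
            have h1 := List.length_dropWhile_le (fun x => x == c) rest
            simp at h
            omega
          have hdecomp : c :: rest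
              = List.replicate ((rest.takeWhile (fun x => x == c)).length + 1) c
                  ++ rest.dropWhile (fun x => x == c) := by
            conv_lhs => rw [← hsplit]
            rw [List.replicate_succ]
            conv_lhs => rw [hrun]
            rfl
          have hP : pvPairs (c :: rest)
              = List.replicate (rest.takeWhile (fun x => x == c)).length c
                  ++ pvPairs (rest.dropWhile (fun x => x == c)) := by
            rw [hdecomp]
            exact pvPairs_replicate_append c _ hhead _
          show altRunCounts (c :: rest) d = _
          rw [altRunCounts]
          rw [ih _ hlen, hP, pvF_append]
          congr 1
          cases hm : (rest.takeWhile (fun x => x == c)).length with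
          | zero => simp [pvF]
          | succ m =>
              have h2 : 2 ≤ m + 1 + 1 := by omega
              simp only [if_pos h2]
              rw [pvF_replicate]
              congr 1
              push_cast
              ring

theorem stepA_fold (cs : List Char) : ∀ (k a : Nat), cs.length ≤ a + k →
    ∀ (b : Bool) (d : PySem.Dict Char Int),
    (PySem.List.pyRange (a : Int) ((cs.length : Int) - 1) 1).foldl
        (fun (st : Bool × PySem.Dict Char Int) j =>
          if PySem.List.pyGetD cs j ' ' = PySem.List.pyGetD cs (j + 1) ' ' then
            (true, st.2.insert (PySem.List.pyGetD cs j ' ')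
              (if st.2.contains (PySem.List.pyGetD cs j ' ') = false then 1
               else st.2.getD (PySem.List.pyGetD cs j ' ') 0 + 1))
          else st)
        (b, d)
      = (b || !(pvPairs (cs.drop a)).isEmpty, pvF d (pvPairs (cs.drop a))) := by
  intro k
  induction k with
  | zero =>
      intro a h b d
      have hnil : PySem.List.pyRange (a : Int) ((cs.length : Int) - 1) 1 = [] :=
        PySem.List.pyRange_one_eq_nil (by simp at h ⊢; omega)
      have hdrop : cs.drop a = [] := List.drop_eq_nil_of_le (by omega)
      rw [hnil, hdrop]
      simp [pvPairs, pvF]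
  | succ k ih =>
      intro a h b d
      by_cases hb : cs.length ≤ a + 1
      · have hnil : PySem.List.pyRange (a : Int) ((cs.length : Int) - 1) 1 = [] :=
          PySem.List.pyRange_one_eq_nil (by omega)
        have hP : pvPairs (cs.drop a) = [] := by
          apply pvPairs_short
          simp
          omega
        rw [hnil, hP]
        simp [pvF]
      · have ha1 : a + 1 < cs.length := by omega
        have hcons : PySem.List.pyRange (a : Int) ((cs.length : Int) - 1) 1
            = (a : Int) :: PySem.List.pyRange ((a : Int) + 1) ((cs.length : Int) - 1) 1 :=
          PySem.List.pyRange_one_cons (by omega)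
        have hga : PySem.List.pyGetD cs (a : Int) ' ' = cs[a]'(by omega) := by
          rw [PySem.List.pyGetD_natCast]
          exact List.getD_eq_getElem cs ' ' (by omega)
        have hcast : ((a : Int) + 1) = ((a + 1 : Nat) : Int) := by push_cast; ring
        have hga1 : PySem.List.pyGetD cs ((a : Int) + 1) ' ' = cs[a+1]'(by omega) := by
          rw [hcast, PySem.List.pyGetD_natCast]
          exact List.getD_eq_getElem cs ' ' (by omega)
        have hdropa : cs.drop a = cs[a]'(by omega) :: cs.drop (a + 1) :=
          List.drop_eq_getElem_cons (by omega)
        have hdropa1 : cs.drop (a + 1) = cs[a+1]'(by omega) :: cs.drop (a + 2) :=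
          List.drop_eq_getElem_cons (by omega)
        have hPa : pvPairs (cs.drop a)
            = (if cs[a]'(by omega) = cs[a+1]'(by omega) then [cs[a]'(by omega)] else [])
                ++ pvPairs (cs.drop (a + 1)) := by
          rw [hdropa]
          conv_lhs => rw [hdropa1]
          rw [pvPairs]
          congr 1
          rw [hdropa1]
        rw [hcons, List.foldl_cons]
        by_cases hc : cs[a]'(by omega) = cs[a+1]'(by omega)
        · rw [if_pos (by rw [hga, hga1]; exact hc)]
          have hstep : (true, d.insert (PySem.List.pyGetD cs (a : Int) ' ')
              (if d.contains (PySem.List.pyGetD cs (a : Int) ' ') = false then 1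
               else d.getD (PySem.List.pyGetD cs (a : Int) ' ') 0 + 1))
              = (true, d.insert (cs[a]'(by omega)) (d.getD (cs[a]'(by omega)) 0 + 1)) := by
            rw [hga, insert_cond]
          rw [hstep, hcast, ih (a + 1) (by omega)]
          rw [hPa, if_pos hc]
          simp [pvF]
        · rw [if_neg (by rw [hga, hga1]; exact hc)]
          rw [hcast, ih (a + 1) (by omega)]
          rw [hPa, if_neg hc]
          simp

theorem items_pvF_empty (xs : List Char) :
    ((pvF PySem.Dict.empty xs).items = [] ↔ xs = []) := by
  have hc : pvF PySem.Dict.empty xs = PySem.Dict.counter xs :=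
    PySem.Dict.foldl_insert_getD_add_one_eq_counter xs
  have hkeys : (PySem.Dict.counter xs).keys = PySem.Set.ofList xs :=
    PySem.Dict.keys_counter xs
  rw [hc]
  constructor
  · intro hit
    cases xs with
    | nil => rfl
    | cons x xs' =>
        exfalso
        have hx : x ∈ PySem.Set.ofList (x :: xs') := by
          rw [PySem.Set.mem_ofList]
          exact List.mem_cons_self
        rw [← hkeys] at hx
        have hk : (PySem.Dict.counter (x :: xs')).keys = [] := by
          simp [PySem.Dict.keys, hit]
        rw [hk] at hx
        exact (List.not_mem_nil) hx
  · intro hx; subst hx; rfl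

def pvStepA : (List Int × List Int) → Int → (List Int × List Int) := fun acc i =>
  let n : List Char := PySem.Int.toChars i
  let st :=
    (PySem.List.pyRange 0 ((n.length : Int) - 1) 1).foldl
      (fun (st : Bool × PySem.Dict Char Int) j =>
        if PySem.List.pyGetD n j ' ' = PySem.List.pyGetD n (j + 1) ' ' then
          (true, st.2.insert (PySem.List.pyGetD n j ' ')
            (if st.2.contains (PySem.List.pyGetD n j ' ') = false then 1
             else st.2.getD (PySem.List.pyGetD n j ' ') 0 + 1))
        else st)
      (false, PySem.Dict.empty)
  ((if st.1 then acc.1 ++ [i] else acc.1),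
   (if (1 : Int) ∈ st.2.values then acc.2 ++ [i] else acc.2))

def pvStepB : (List Int × List Int) → Int → (List Int × List Int) := fun acc i =>
  let counts := altRunCounts (PySem.Int.toChars i) PySem.Dict.empty
  ((if counts.items ≠ [] then acc.1 ++ [i] else acc.1),
   (if (1 : Int) ∈ counts.values then acc.2 ++ [i] else acc.2))

theorem pvStep_eq (acc : List Int × List Int) (i : Int) : pvStepA acc i = pvStepB acc i := by
  simp only [pvStepA, pvStepB]
  have hst := stepA_fold (PySem.Int.toChars i) (PySem.Int.toChars i).length 0
    (by omega) false PySem.Dict.empty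
  simp only [Nat.cast_zero, List.drop_zero] at hst
  have halt := altRunCounts_eq (PySem.Int.toChars i).length (PySem.Int.toChars i)
    (le_refl _) PySem.Dict.empty
  rw [hst, halt]
  cases hP : pvPairs (PySem.Int.toChars i) with
  | nil =>
      have hit : (pvF PySem.Dict.empty ([] : List Char)).items = [] :=
        (items_pvF_empty []).mpr rfl
      simp [hit]
  | cons y ys =>
      have hit : (pvF PySem.Dict.empty (y :: ys)).items ≠ [] := by
        intro hcontr
        cases (items_pvF_empty (y :: ys)).mp hcontr
      simp [hit]

theorem double_eq_alt (arr : List Int) : double arr = double_alt arr := by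
  have h : ∀ (l : List Int) (acc : List Int × List Int),
      List.foldl pvStepA acc l = List.foldl pvStepB acc l := by
    intro l
    induction l with
    | nil => intro acc; rfl
    | cons x xs ih =>
        intro acc
        rw [List.foldl_cons, List.foldl_cons, pvStep_eq, ih]
  exact h arr ([], [])

-- ===== VERDICT (by name: the statement is the Claim_ definition above) =====
theorem double_spec : Claim_equal_double := by
  intro arr _
  unfold Spec_double
  exact double_eq_alt arr
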